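-- pv_equiv track=rewrite | github.com/franciscolh04/Projetos-FP | Projeto1/projeto.py | insere_espacos
-- ===== SOURCE A (Python) =====
-- def insere_espacos(cad_carateres, larg_coluna):
--     """Esta função recebe uma cadeia de carateres e um inteiro positivo e devolve uma
--     cadeia de carateres.
--
--     A cadeia de carateres e o inteiro positivo fornecidos correspondem a um texto limpo e a
--     uma largura de coluna, respetivamente. A cadeia de carateres devolvida tem comprimento
--     igual à largura de coluna fornecida com espaços entre palavras conforme descrito no enunciado
--     caso a cadeia original contenha duas ou mais palavras. Caso contrário, é devolvida uma cadeia
--     de comprimento igual à largura da coluna formada pela original seguida de espaços.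
--
--     :param cad_carateres: cadeia correspondente a texto limpo.
--     :param larg_coluna: inteiro positivo correspondente a largura de coluna.
--     :return: cadeia de carateres com espaços inseridos tal como é pedido.
--     """
--     lista_palavras = cad_carateres.split()
--     cadeia_nova = ""
--     lista_nova = []
--
--     #Caso o número de palavras do texto de entrada seja maior ou igual a 2
--     if len(lista_palavras) >= 2:
--         #Lista com palavras e espaços
--         for i in range(len(lista_palavras)):
--             lista_nova += [lista_palavras[i], " "]
--         lista_nova.pop()
--
--         # Lista com posição dos espaços (números ímpares)
--         posicao = []
--         for i in range(len(lista_nova)):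
--             if " " in lista_nova[i]:
--                 posicao.append(i)
--
--         #Cálculo de espaços restantes
--         num_espacos = len(posicao)
--         tamanho_restante = larg_coluna - len("".join(lista_nova))
--
--         #Inserção de espaços na lista
--         for i in posicao:
--             lista_nova[i] = " " + " " * int(tamanho_restante // num_espacos)
--             # lista_nova[i] = " " * (1 + int(tamanho_restante / num_espacos))
--         # Inserção de Espaços restantes
--         if tamanho_restante % num_espacos != 0:
--             resto = tamanho_restante % num_espacos
--             for i in posicao:
--                 if resto > 0:
--                     lista_nova[i] += " "
--                 resto -= 1
--         #Conversão da lista obtida para string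
--         cadeia_nova = "".join(lista_nova)
--
--     # Caso o texto de entrada só tenha uma palavra
--     else:
--         cadeia_nova += cad_carateres
--         while len(cadeia_nova) < larg_coluna:
--             cadeia_nova += " "
--
--     return cadeia_nova
-- ===== SOURCE B (Python) =====
-- def insere_espacos(cad_carateres, larg_coluna):
--     # pass 1: count words and word characters by scanning the string (no word list)
--     n_words = 0
--     chars = 0
--     prev_space = True
--     for c in cad_carateres:
--         if c.isspace():
--             prev_space = True
--         else:
--             if prev_space:
--                 n_words += 1
--             chars += 1
--             prev_space = False
--     if n_words < 2:
--         return cad_carateres + " " * (larg_coluna - len(cad_carateres))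
--     gaps = n_words - 1
--     q, r = divmod(larg_coluna - chars - gaps, gaps)
--     pad = " " * (1 + q) if q >= 0 else " "
--     # pass 2: emit characters, replacing each whitespace run between words by its separator
--     out = []
--     gap_i = 0
--     prev_space = True
--     for c in cad_carateres:
--         if c.isspace():
--             prev_space = True
--         else:
--             if prev_space and out:
--                 out.append(pad + (" " if gap_i < r else ""))
--                 gap_i += 1
--             out.append(c)
--             prev_space = False
--     return "".join(out)
-- ===== Notes on version B (the rewrite author's own statement) =====
-- stated objective: alternative
-- what changed: B never builds a word list: it justifies the text with two plain character scans - a counting pass (word count + word characters) and an emitting state machine that copies word characters and replaces each inter-word whitespace run with its computed separator - instead of A's split, interleaved word/space list, pop, index scan for space positions and two in-place rewrite loops.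
import Mathlib
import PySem

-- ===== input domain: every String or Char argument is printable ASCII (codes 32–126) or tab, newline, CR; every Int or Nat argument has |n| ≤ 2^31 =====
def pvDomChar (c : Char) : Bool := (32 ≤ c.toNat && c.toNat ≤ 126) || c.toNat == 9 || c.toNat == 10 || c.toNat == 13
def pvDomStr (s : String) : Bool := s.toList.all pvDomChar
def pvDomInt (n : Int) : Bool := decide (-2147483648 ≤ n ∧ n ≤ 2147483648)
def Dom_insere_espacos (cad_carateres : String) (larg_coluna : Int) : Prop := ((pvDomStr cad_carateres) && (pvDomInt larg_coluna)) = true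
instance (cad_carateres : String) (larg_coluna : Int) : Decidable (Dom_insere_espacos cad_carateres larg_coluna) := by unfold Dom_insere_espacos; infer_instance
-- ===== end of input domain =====

-- B never materializes A's word list: it makes two plain character scans (one counting pass, one
-- emitting state machine that rewrites each inter-word whitespace run), instead of A's
-- split/interleave/pop/position-scan plus two in-place rewrite loops (objective: alternative).

-- ===== PORT A =====
-- the 'while len(cadeia_nova) < larg_coluna: cadeia_nova += " "' loop of A
def padLoop (cs : List Char) (larg : Int) : List Char :=
  if (cs.length : Int) < larg then padLoop (cs ++ [' ']) larg else cs
termination_by (larg - cs.length).toNat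
decreasing_by simp; omega

def insere_espacos (cad_carateres : String) (larg_coluna : Int) : String :=
  let cs := cad_carateres.toList
  let lista_palavras := PySem.Chars.split₀ cs
  if 2 ≤ lista_palavras.length then
    let lista_nova :=
      (PySem.List.pyRange 0 (lista_palavras.length : Int) 1).foldl
        (fun acc i => acc ++ [PySem.List.pyGetD lista_palavras i [], [' ']]) []
    let lista_nova :=
      match PySem.List.pop? lista_nova with
      | some (_, l) => l
      | none => []   -- unreachable: lista_nova is nonempty here (on [] Python's .pop() would raise)
    let posicao : List Int :=
      (PySem.List.pyRange 0 (lista_nova.length : Int) 1).foldl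
        (fun acc i => if PySem.Chars.isIn [' '] (PySem.List.pyGetD lista_nova i []) then acc ++ [i] else acc) []
    let num_espacos : Int := (posicao.length : Int)
    let tamanho_restante : Int := larg_coluna - ((PySem.Chars.join [] lista_nova).length : Int)
    -- 'lista_nova[i] = …' / 'lista_nova[i] += " "': every i ∈ posicao comes from range(len(lista_nova)),
    -- so 0 ≤ i < len and .set i.toNat / pyGetD are exact here
    let lista_nova :=
      posicao.foldl
        (fun l i => l.set i.toNat
          ([' '] ++ PySem.List.pyRepeat [' '] (PySem.Int.floordiv tamanho_restante num_espacos))) lista_nova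
    let lista_nova :=
      if PySem.Int.mod tamanho_restante num_espacos ≠ 0 then
        (posicao.foldl
          (fun (st : List (List Char) × Int) i =>
            (if 0 < st.2 then st.1.set i.toNat (PySem.List.pyGetD st.1 i [] ++ [' ']) else st.1, st.2 - 1))
          (lista_nova, PySem.Int.mod tamanho_restante num_espacos)).1
      else lista_nova
    String.ofList (PySem.Chars.join [] lista_nova)
  else
    String.ofList (padLoop ([] ++ cs) larg_coluna)

-- ===== PORT B =====
-- B, transliterated: pass 1 folds (n_words, chars, prev_space) over the characters; pass 2 folds
-- (out, gap_i, prev_space); 'divmod' is ported as its two components (floordiv, mod), exact here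
-- since the divisor gaps ≥ 1.  The two loop bodies are the helpers pass1Step / pass2Step.
def pass1Step (st : Int × Int × Bool) (c : Char) : Int × Int × Bool :=
  if PySem.Chars.isspace c then (st.1, st.2.1, true)
  else ((if st.2.2 then st.1 + 1 else st.1), st.2.1 + 1, false)

def pass2Step (pad : List Char) (r : Int) (st : List (List Char) × Int × Bool) (c : Char) :
    List (List Char) × Int × Bool :=
  if PySem.Chars.isspace c then (st.1, st.2.1, true)
  else
    ((if st.2.2 && !st.1.isEmpty
        then st.1 ++ [pad ++ (if st.2.1 < r then [' '] else [])]
        else st.1) ++ [[c]],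
     (if st.2.2 && !st.1.isEmpty then st.2.1 + 1 else st.2.1), false)

def insere_espacos_alt (cad_carateres : String) (larg_coluna : Int) : String :=
  let cs := cad_carateres.toList
  let st1 := cs.foldl pass1Step (0, 0, true)
  if st1.1 < 2 then
    String.ofList (cs ++ PySem.List.pyRepeat [' '] (larg_coluna - (cs.length : Int)))
  else
    let gaps : Int := st1.1 - 1
    let q := PySem.Int.floordiv (larg_coluna - st1.2.1 - gaps) gaps
    let r := PySem.Int.mod (larg_coluna - st1.2.1 - gaps) gaps
    let pad : List Char := if 0 ≤ q then PySem.List.pyRepeat [' '] (1 + q) else [' ']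
    let st2 := cs.foldl (pass2Step pad r) ([], 0, true)
    String.ofList (PySem.Chars.join [] st2.1)

-- ===== PRECONDITION & SPEC =====
def Spec_insere_espacos (cad_carateres : String) (larg_coluna : Int) (out : String) : Prop := out = insere_espacos_alt cad_carateres larg_coluna
instance (cad_carateres : String) (larg_coluna : Int) (out : String) : Decidable (Spec_insere_espacos cad_carateres larg_coluna out) := by unfold Spec_insere_espacos; infer_instance

-- ===== CLAIM (what is proved, stated in full; the proofs are below) =====
def Claim_equal_insere_espacos : Prop := ∀ (cad_carateres : String) (larg_coluna : Int), Dom_insere_espacos cad_carateres larg_coluna → Spec_insere_espacos cad_carateres larg_coluna (insere_espacos cad_carateres larg_coluna)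

-- ===== LEMMAS AND PROOFS =====

-- A's lista_nova before the pop: words interleaved with single spaces plus a trailing space;
-- mix0 is its tail, mix sep its shape after the first rewrite loop.
def mix0 (t : List (List Char)) : List (List Char) := t.flatMap (fun u => [[' '], u])
def mix (sep : List Char) (t : List (List Char)) : List (List Char) := t.flatMap (fun u => [sep, u])

-- shape of A's list after both rewrite loops: gap k of the n gaps gets sep plus, while the
-- counter r is still positive, one extra space
def Tlist (sep : List Char) : List (List Char) → Int → List (List Char)
  | [], _ => []
  | u :: t, r => (if 0 < r then sep ++ [' '] else sep) :: u :: Tlist sep t (r - 1)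

-- B-side shapes: each emitted word character is its own piece; idxEmit renders the words after
-- the first one, gap g getting its separator.
def emitW (w : List Char) : List (List Char) := w.map (fun c => [c])

def idxEmit (pad : List Char) (r : Int) : Int → List (List Char) → List (List Char)
  | _, [] => []
  | g, w :: ws => (pad ++ (if g < r then [' '] else [])) :: (emitW w ++ idxEmit pad r (g + 1) ws)

-- the out-list of B's pass 2 as a function of split₀.go's state (cur = current word reversed,
-- acc = completed words, most recent first)
def outMap (pad : List Char) (r : Int) (cur : List Char) (acc : List (List Char)) : List (List Char) :=
  match acc.reverse with
  | [] => emitW cur.reverse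
  | w :: rest =>
      emitW w ++ idxEmit pad r 0 rest ++
        (if cur.isEmpty then []
         else (pad ++ (if (rest.length : Int) < r then [' '] else [])) :: emitW cur.reverse)

def gapMap (cur : List Char) (acc : List (List Char)) : Int :=
  if acc.isEmpty then 0 else (acc.length : Int) - 1 + (if cur.isEmpty then 0 else 1)

def finMap (pad : List Char) (r : Int) : List (List Char) → List (List Char)
  | [] => []
  | w :: ws => emitW w ++ idxEmit pad r 0 ws

theorem padLoop_eq (cs : List Char) (larg : Int) :
    padLoop cs larg = cs ++ List.replicate (larg - cs.length).toNat ' ' := by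
  induction hm : (larg - cs.length).toNat generalizing cs with
  | zero =>
    rw [padLoop, if_neg (by omega)]
    simp
  | succ m ih =>
    rw [padLoop, if_pos (by omega)]
    rw [ih (cs ++ [' ']) (by simp; omega)]
    simp [List.replicate_succ]

theorem split₀_go_no_space (s : List Char) : ∀ (cur : List Char) (acc : List (List Char)),
    (∀ c ∈ cur, PySem.Chars.isspace c = false) →
    (∀ w ∈ acc, ∀ c ∈ w, PySem.Chars.isspace c = false) →
    ∀ w ∈ PySem.Chars.split₀.go s cur acc, ∀ c ∈ w, PySem.Chars.isspace c = false := by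
  induction s with
  | nil =>
    intro cur acc hcur hacc w hw
    simp only [PySem.Chars.split₀.go] at hw
    split at hw
    · exact hacc w (by simpa using hw)
    · simp only [List.mem_reverse, List.mem_cons] at hw
      rcases hw with h | h
      · intro c hc; exact hcur c (by simpa [h] using hc)
      · exact hacc w h
  | cons c rest ih =>
    intro cur acc hcur hacc w hw
    by_cases hsp : PySem.Chars.isspace c = true
    · simp only [PySem.Chars.split₀.go, hsp, if_true] at hw
      split at hw
      · exact ih [] acc (by simp) hacc w hw
      · refine ih [] (cur.reverse :: acc) (by simp) ?_ w hw
        intro u hu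
        rcases List.mem_cons.mp hu with h | h
        · intro d hd; exact hcur d (by simpa [h] using hd)
        · exact hacc u h
    · simp only [PySem.Chars.split₀.go, hsp] at hw
      refine ih (c :: cur) acc ?_ hacc w hw
      intro d hd
      rcases List.mem_cons.mp hd with h | h
      · simpa [h] using (Bool.eq_false_iff.mpr hsp)
      · exact hcur d h

theorem split₀_no_space (cs : List Char) :
    ∀ w ∈ PySem.Chars.split₀ cs, PySem.Chars.isIn [' '] w = false := by
  intro w hw
  have h := split₀_go_no_space cs [] [] (by simp) (by simp) w hw
  rw [PySem.Chars.isIn_eq_false_iff]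
  intro hinf
  have hm : ' ' ∈ w := hinf.mem (by simp)
  have := h ' ' hm
  simp [PySem.Chars.isspace] at this

theorem build_eq (ws : List (List Char)) :
    (PySem.List.pyRange 0 (ws.length : Int) 1).foldl
      (fun acc i => acc ++ [PySem.List.pyGetD ws i [], [' ']]) []
    = ws.flatMap (fun x => [x, [' ']]) := by
  rw [PySem.List.foldl_append_eq_flatMap (fun i => [PySem.List.pyGetD ws i [], [' ']])]
  rw [List.nil_append, List.flatMap_def, List.flatMap_def]
  have h : List.map (fun i => [PySem.List.pyGetD ws i [], ([' '] : List Char)]) (PySem.List.pyRange 0 (ws.length : Int) 1)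
      = List.map (fun x => [x, [' ']]) ws := by
    have h2 := PySem.List.map_pyGetD_pyRange_zero ws ([] : List Char)
    calc List.map (fun i => [PySem.List.pyGetD ws i [], ([' '] : List Char)]) (PySem.List.pyRange 0 (ws.length : Int) 1)
        = List.map (fun x => [x, [' ']]) (List.map (fun i => PySem.List.pyGetD ws i []) (PySem.List.pyRange 0 (ws.length : Int) 1)) := by
          rw [List.map_map]; rfl
      _ = List.map (fun x => [x, [' ']]) ws := by rw [show (ws.length : Int) = PySem.List.len ws from rfl, h2]
  rw [h]

theorem build_decomp (t : List (List Char)) : ∀ (w : List Char),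
    (w :: t).flatMap (fun x => [x, [' ']]) = (w :: mix0 t) ++ [[' ']] := by
  induction t with
  | nil => intro w; simp [mix0]
  | cons u t ih =>
    intro w
    have : (w :: u :: t).flatMap (fun x => [x, [' ']]) = w :: [' '] :: (u :: t).flatMap (fun x => [x, [' ']]) := by
      simp
    rw [this, ih u]
    simp [mix0]

theorem mix0_len (t : List (List Char)) : (mix0 t).length = 2 * t.length := by
  induction t with
  | nil => simp [mix0]
  | cons u t ih => simp only [mix0, List.flatMap_cons] at *; simp [ih]; omega

theorem getD_even (t : List (List Char)) : ∀ (w : List Char) (k : Nat),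
    (w :: mix0 t).getD (2 * k) [] = (w :: t).getD k [] := by
  induction t with
  | nil =>
    intro w k
    cases k with
    | zero => simp
    | succ k => simp [mix0, List.getD]
  | cons u t ih =>
    intro w k
    cases k with
    | zero => simp
    | succ k =>
      have h : 2 * (k + 1) = (2 * k) + 1 + 1 := by ring
      rw [h]
      have hm : (w :: mix0 (u :: t)) = w :: [' '] :: u :: mix0 t := by simp [mix0]
      rw [hm, List.getD_cons_succ, List.getD_cons_succ, List.getD_cons_succ]
      exact ih u k

theorem getD_odd (t : List (List Char)) : ∀ (w : List Char) (k : Nat), k < t.length →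
    (w :: mix0 t).getD (2 * k + 1) [] = [' '] := by
  induction t with
  | nil => intro w k hk; simp at hk
  | cons u t ih =>
    intro w k hk
    cases k with
    | zero => simp [mix0]
    | succ k =>
      have h : 2 * (k + 1) + 1 = (2 * k + 1) + 1 + 1 := by ring
      have hm : (w :: mix0 (u :: t)) = w :: [' '] :: u :: mix0 t := by simp [mix0]
      rw [h, hm, List.getD_cons_succ, List.getD_cons_succ]
      exact ih u k (by simpa using hk)

theorem filter_odd_nat (n : Nat) (p : Nat → Bool)
    (h1 : ∀ k, k < n → p (2 * k + 1) = true) (h0 : ∀ k, k ≤ n → p (2 * k) = false) :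
    (List.range (2 * n + 1)).filter p = (List.range n).map (fun k => 2 * k + 1) := by
  induction n with
  | zero =>
    have : List.range 1 = [0] := by decide
    simp [this, show p 0 = false by simpa using h0 0 (by omega)]
  | succ n ih =>
    have hr : List.range (2 * (n + 1) + 1) = List.range (2 * n + 1) ++ [2 * n + 1, 2 * n + 2] := by
      have e1 : 2 * (n + 1) + 1 = (2 * n + 2) + 1 := by ring
      rw [e1, List.range_succ, show 2 * n + 2 = (2 * n + 1) + 1 from by ring, List.range_succ]
      simp
    rw [hr, List.filter_append]
    have hodd : p (2 * n + 1) = true := h1 n (by omega)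
    have heven : p (2 * n + 2) = false := by
      have := h0 (n + 1) (by omega); simpa [show 2 * (n + 1) = 2 * n + 2 from by ring] using this
    rw [ih (fun k hk => h1 k (by omega)) (fun k hk => h0 k (by omega))]
    rw [List.range_succ, List.map_append]
    simp [hodd, heven]

theorem filter_odd (n : Nat) (p : Int → Bool)
    (h1 : ∀ k : Nat, k < n → p ((2 * k + 1 : Nat) : Int) = true)
    (h0 : ∀ k : Nat, k ≤ n → p ((2 * k : Nat) : Int) = false) :
    (PySem.List.pyRange 0 ((2 * n + 1 : Nat) : Int) 1).filter p
      = (List.range n).map (fun k => ((2 * k + 1 : Nat) : Int)) := by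
  rw [PySem.List.pyRange_zero_natCast, List.filter_map,
    filter_odd_nat n (p ∘ fun k => (k : Int)) (fun k hk => by simpa using h1 k hk)
      (fun k hk => by simpa using h0 k hk), List.map_map]
  rfl

theorem shiftA (v : List Char) : ∀ (is : List Nat) (a b : List Char) (L : List (List Char)),
    is.foldl (fun l k => l.set (2 * (k + 1) + 1) v) (a :: b :: L)
      = a :: b :: is.foldl (fun l k => l.set (2 * k + 1) v) L := by
  intro is
  induction is with
  | nil => intro a b L; simp
  | cons i is ih =>
    intro a b L
    simp only [List.foldl_cons]
    have h : 2 * (i + 1) + 1 = (2 * i + 1) + 1 + 1 := by ring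
    rw [h, List.set_cons_succ, List.set_cons_succ, ih]

theorem loop1 (v : List Char) (t : List (List Char)) : ∀ (w : List Char),
    (List.range t.length).foldl (fun l k => l.set (2 * k + 1) v) (w :: mix0 t) = w :: mix v t := by
  induction t with
  | nil => intro w; simp [mix0, mix]
  | cons u t ih =>
    intro w
    rw [List.length_cons, List.range_succ_eq_map, List.foldl_cons, List.foldl_map]
    have hm : (w :: mix0 (u :: t)) = w :: [' '] :: u :: mix0 t := by simp [mix0]
    rw [hm]
    have hset : (w :: [' '] :: u :: mix0 t).set (2 * 0 + 1) v = w :: v :: u :: mix0 t := by simp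
    rw [hset]
    simp only [Nat.succ_eq_add_one]
    rw [shiftA v (List.range t.length) w v (u :: mix0 t), ih u]
    simp [mix]

theorem shiftB : ∀ (is : List Nat) (a b : List Char) (L : List (List Char)) (r : Int),
    is.foldl (fun (st : List (List Char) × Int) k =>
        (if 0 < st.2 then st.1.set (2 * (k + 1) + 1) (st.1.getD (2 * (k + 1) + 1) [] ++ [' ']) else st.1,
         st.2 - 1)) (a :: b :: L, r)
    = ((a :: b :: (is.foldl (fun (st : List (List Char) × Int) k =>
        (if 0 < st.2 then st.1.set (2 * k + 1) (st.1.getD (2 * k + 1) [] ++ [' ']) else st.1,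
         st.2 - 1)) (L, r)).1),
       (is.foldl (fun (st : List (List Char) × Int) k =>
        (if 0 < st.2 then st.1.set (2 * k + 1) (st.1.getD (2 * k + 1) [] ++ [' ']) else st.1,
         st.2 - 1)) (L, r)).2) := by
  intro is
  induction is with
  | nil => intro a b L r; simp
  | cons i is ih =>
    intro a b L r
    simp only [List.foldl_cons]
    have h : 2 * (i + 1) + 1 = (2 * i + 1) + 1 + 1 := by ring
    by_cases hr : 0 < r
    · rw [if_pos hr, if_pos hr, h, List.getD_cons_succ, List.getD_cons_succ,
        List.set_cons_succ, List.set_cons_succ, ih]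
    · rw [if_neg hr, if_neg hr, ih]

theorem loop2 (sep : List Char) (t : List (List Char)) : ∀ (w : List Char) (r : Int),
    ((List.range t.length).foldl (fun (st : List (List Char) × Int) k =>
        (if 0 < st.2 then st.1.set (2 * k + 1) (st.1.getD (2 * k + 1) [] ++ [' ']) else st.1,
         st.2 - 1)) (w :: mix sep t, r)).1
    = w :: Tlist sep t r := by
  induction t with
  | nil => intro w r; simp [mix, Tlist]
  | cons u t ih =>
    intro w r
    rw [List.length_cons, List.range_succ_eq_map, List.foldl_cons, List.foldl_map]
    have hm : (w :: mix sep (u :: t)) = w :: sep :: u :: mix sep t := by simp [mix]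
    rw [hm]
    have hstep : ((if 0 < r then (w :: sep :: u :: mix sep t).set (2 * 0 + 1) ((w :: sep :: u :: mix sep t).getD (2 * 0 + 1) [] ++ [' ']) else w :: sep :: u :: mix sep t), r - 1)
        = ((w :: (if 0 < r then sep ++ [' '] else sep) :: u :: mix sep t), r - 1) := by
      by_cases hr : 0 < r <;> simp [hr]
    rw [hstep]
    simp only [Nat.succ_eq_add_one]
    rw [shiftB (List.range t.length) w (if 0 < r then sep ++ [' '] else sep) (u :: mix sep t) (r - 1)]
    simp only
    rw [ih u (r - 1)]
    simp [Tlist]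

theorem join_nil_eq_flatten : ∀ (L : List (List Char)), PySem.Chars.join [] L = L.flatten := by
  intro L
  induction L with
  | nil => simp [PySem.Chars.join_nil]
  | cons x L ih =>
    cases L with
    | nil => simp [PySem.Chars.join_singleton]
    | cons y L => rw [PySem.Chars.join_cons_cons, ih]; simp

theorem flatten_mix0 (t : List (List Char)) : (mix0 t).flatten = t.flatMap (fun u => ' ' :: u) := by
  induction t with
  | nil => simp [mix0]
  | cons u t ih => simp only [mix0, List.flatMap_cons] at *; simp [ih]

theorem join_sp_eq (ws : List (List Char)) : ∀ (w : List Char),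
    PySem.Chars.join [' '] (w :: ws) = w ++ ws.flatMap (fun u => ' ' :: u) := by
  induction ws with
  | nil => intro w; simp [PySem.Chars.join_singleton]
  | cons u ws ih =>
    intro w
    rw [PySem.Chars.join_cons_cons, ih u]
    simp

theorem Tlist_nonpos (sep : List Char) (t : List (List Char)) : ∀ (r : Int), r ≤ 0 →
    Tlist sep t r = mix sep t := by
  induction t with
  | nil => intro r _; simp [Tlist, mix]
  | cons u t ih =>
    intro r hr
    rw [Tlist, if_neg (by omega), ih (r - 1) (by omega)]
    simp [mix]


-- ===== B-side lemmas =====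

theorem emitW_append (a b : List Char) : emitW (a ++ b) = emitW a ++ emitW b := by
  simp [emitW]

theorem emitW_ne_nil (w : List Char) (h : w ≠ []) : emitW w ≠ [] := by
  cases w with
  | nil => exact absurd rfl h
  | cons c w => simp [emitW]

theorem idxEmit_append (pad : List Char) (r : Int) (ws : List (List Char)) : ∀ (g : Int) (v : List Char),
    idxEmit pad r g (ws ++ [v])
      = idxEmit pad r g ws ++ (pad ++ (if g + (ws.length : Int) < r then [' '] else [])) :: emitW v := by
  induction ws with
  | nil => intro g v; simp [idxEmit]
  | cons u ws ih =>
    intro g v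
    have e : g + 1 + (ws.length : Int) = g + (((u :: ws).length : Nat) : Int) := by
      simp only [List.length_cons]; push_cast; ring
    simp only [List.cons_append, idxEmit, ih (g + 1) v, e, List.append_assoc, List.cons_append]

-- B's pass-1 fold computes the number and the total length of split₀'s words
theorem pass1_eq (s : List Char) : ∀ (cur : List Char) (acc : List (List Char)) (n ch : Int),
    n = (acc.length : Int) + (if cur.isEmpty then 0 else 1) →
    ch = ((acc.map List.length).sum : Int) + (cur.length : Int) →
    ∃ b : Bool, s.foldl pass1Step (n, ch, cur.isEmpty)
      = (((PySem.Chars.split₀.go s cur acc).length : Int),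
         (((PySem.Chars.split₀.go s cur acc).map List.length).sum : Int), b) := by
  induction s with
  | nil =>
    intro cur acc n ch hn hch
    refine ⟨cur.isEmpty, ?_⟩
    simp only [List.foldl_nil, PySem.Chars.split₀.go]
    by_cases hc : cur.isEmpty
    · have hcur : cur = [] := List.isEmpty_iff.mp hc
      subst hcur
      simp at hn hch
      simp [hn, hch]
    · rw [if_neg hc]
      rw [if_neg hc] at hn
      simp only [List.length_reverse, List.map_reverse, List.sum_reverse, List.length_cons,
        List.map_cons, List.sum_cons, List.length_reverse]
      refine Prod.ext ?_ (Prod.ext ?_ rfl)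
      · simp only [hn]; push_cast; ring
      · simp only [hch]; push_cast; ring
  | cons c s ih =>
    intro cur acc n ch hn hch
    rw [List.foldl_cons]
    by_cases hsp : PySem.Chars.isspace c
    · rw [show pass1Step (n, ch, cur.isEmpty) c = (n, ch, true) from by simp [pass1Step, hsp]]
      by_cases hc : cur.isEmpty
      · have hcur : cur = [] := List.isEmpty_iff.mp hc
        subst hcur
        have h2 := ih [] acc n ch (by simpa using hn) (by simpa using hch)
        simp only [List.isEmpty_nil] at h2
        rw [show PySem.Chars.split₀.go (c :: s) [] acc = PySem.Chars.split₀.go s [] acc from by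
          simp [PySem.Chars.split₀.go, hsp]]
        exact h2
      · rw [if_neg hc] at hn
        have h2 := ih [] (cur.reverse :: acc) n ch
          (by rw [hn]; simp <;> (push_cast [List.length_cons]; ring))
          (by rw [hch]; simp <;> (push_cast [List.length_cons]; ring))
        simp only [List.isEmpty_nil] at h2
        rw [show PySem.Chars.split₀.go (c :: s) cur acc = PySem.Chars.split₀.go s [] (cur.reverse :: acc) from by
          simp [PySem.Chars.split₀.go, hsp, hc]]
        exact h2
    · rw [show pass1Step (n, ch, cur.isEmpty) c
          = ((if cur.isEmpty then n + 1 else n), ch + 1, false) from by simp [pass1Step, hsp]]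
      rw [show PySem.Chars.split₀.go (c :: s) cur acc = PySem.Chars.split₀.go s (c :: cur) acc from by
        simp [PySem.Chars.split₀.go, hsp]]
      have h2 := ih (c :: cur) acc (if cur.isEmpty then n + 1 else n) (ch + 1) ?_ ?_
      · simpa using h2
      · by_cases hc : cur.isEmpty
        · rw [if_pos hc, hn, if_pos hc]
          simp
        · rw [if_neg hc, hn, if_neg hc]
          simp
      · rw [hch]
        push_cast [List.length_cons]
        ring

theorem flatten_emitW (w : List Char) : (emitW w).flatten = w := by
  induction w with
  | nil => simp [emitW]
  | cons c w ih => simp [emitW] at *; exact ih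

theorem outMap_fin (pad : List Char) (r : Int) (acc : List (List Char)) :
    outMap pad r [] acc = finMap pad r acc.reverse := by
  unfold outMap finMap
  cases h : acc.reverse with
  | nil => simp [emitW]
  | cons w rest => simp

theorem outMap_close (pad : List Char) (r : Int) (cur : List Char) (acc : List (List Char))
    (hc : ¬ cur.isEmpty) :
    outMap pad r cur acc = outMap pad r [] (cur.reverse :: acc) := by
  unfold outMap
  rw [show (cur.reverse :: acc).reverse = acc.reverse ++ [cur.reverse] from by simp]
  cases h : acc.reverse with
  | nil => simp [hc, idxEmit, emitW]
  | cons w rest => simp [hc, idxEmit_append]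

theorem gapMap_close (cur : List Char) (acc : List (List Char)) (hc : ¬ cur.isEmpty) :
    gapMap cur acc = gapMap [] (cur.reverse :: acc) := by
  unfold gapMap
  cases acc with
  | nil => simp [hc]
  | cons a l =>
    simp [hc] <;> (push_cast [List.length_cons]; ring)

theorem outMap_extend (pad : List Char) (r : Int) (c : Char) (cur : List Char)
    (acc : List (List Char)) (hc : ¬ cur.isEmpty) :
    outMap pad r (c :: cur) acc = outMap pad r cur acc ++ [[c]] := by
  unfold outMap
  cases h : acc.reverse with
  | nil => simp [emitW_append, emitW]
  | cons w rest => simp [hc, emitW_append, emitW]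

theorem gapMap_extend (c : Char) (cur : List Char) (acc : List (List Char))
    (hc : ¬ cur.isEmpty) :
    gapMap (c :: cur) acc = gapMap cur acc := by
  unfold gapMap
  simp [hc]

theorem outMap_sep (pad : List Char) (r : Int) (c : Char) (acc : List (List Char))
    (ha : acc ≠ []) :
    outMap pad r [c] acc
      = outMap pad r [] acc ++ [pad ++ (if gapMap [] acc < r then [' '] else []), [c]] := by
  unfold outMap gapMap
  cases h : acc.reverse with
  | nil => exact absurd (by simpa using congrArg List.reverse h) ha
  | cons w rest =>
    have hlen : (acc.length : Int) - 1 = (rest.length : Int) := by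
      have := congrArg List.length h
      simp at this
      omega
    rw [List.isEmpty_eq_false_iff.mpr ha]
    simp [emitW, ← hlen]

theorem gapMap_sep (c : Char) (acc : List (List Char)) (ha : acc ≠ []) :
    gapMap [c] acc = gapMap [] acc + 1 := by
  unfold gapMap
  rw [List.isEmpty_eq_false_iff.mpr ha]
  simp

theorem outMap_empty (pad : List Char) (r : Int) (cur : List Char) (acc : List (List Char))
    (hacc : ∀ w ∈ acc, w ≠ []) :
    (outMap pad r cur acc).isEmpty = (cur.isEmpty && acc.isEmpty) := by
  unfold outMap
  cases h : acc.reverse with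
  | nil =>
    have : acc = [] := by simpa using congrArg List.reverse h
    subst this
    cases cur with
    | nil => simp [emitW]
    | cons c cur => simp [emitW]
  | cons w rest =>
    have hacc' : acc ≠ [] := by
      intro hh; rw [hh] at h; simp at h
    have hw : w ≠ [] := by
      apply hacc
      have : w ∈ acc.reverse := by rw [h]; simp
      simpa using this
    have hwe : emitW w ≠ [] := emitW_ne_nil w hw
    rw [List.isEmpty_eq_false_iff.mpr hacc']
    simp [hwe]

-- B's pass-2 fold renders split₀'s words with their separators
theorem pass2_eq (pad : List Char) (r : Int) (s : List Char) :
    ∀ (cur : List Char) (acc : List (List Char)) (out : List (List Char)) (gp : Int),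
    (∀ w ∈ acc, w ≠ []) →
    out = outMap pad r cur acc →
    gp = gapMap cur acc →
    ∃ (g : Int) (b : Bool), s.foldl (pass2Step pad r) (out, gp, cur.isEmpty)
      = (finMap pad r (PySem.Chars.split₀.go s cur acc), g, b) := by
  induction s with
  | nil =>
    intro cur acc out gp hacc hout hgp
    refine ⟨gp, cur.isEmpty, ?_⟩
    simp only [List.foldl_nil, PySem.Chars.split₀.go]
    by_cases hc : cur.isEmpty
    · have hcur : cur = [] := List.isEmpty_iff.mp hc
      subst hcur
      rw [if_pos hc, hout, outMap_fin]
    · rw [if_neg hc, hout, outMap_close pad r cur acc hc, outMap_fin]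
  | cons c s ih =>
    intro cur acc out gp hacc hout hgp
    rw [List.foldl_cons]
    by_cases hsp : PySem.Chars.isspace c
    · rw [show pass2Step pad r (out, gp, cur.isEmpty) c = (out, gp, true) from by
        simp [pass2Step, hsp]]
      by_cases hc : cur.isEmpty
      · have hcur : cur = [] := List.isEmpty_iff.mp hc
        subst hcur
        have h2 := ih [] acc out gp hacc hout hgp
        simp only [List.isEmpty_nil] at h2
        rw [show PySem.Chars.split₀.go (c :: s) [] acc = PySem.Chars.split₀.go s [] acc from by
          simp [PySem.Chars.split₀.go, hsp]]
        exact h2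
      · have hne : cur ≠ [] := fun hh => hc (by simp [hh])
        have h2 := ih [] (cur.reverse :: acc) out gp
          (by intro w hw
              rcases List.mem_cons.mp hw with hh | hh
              · rw [hh]; simpa using hne
              · exact hacc w hh)
          (by rw [hout, outMap_close pad r cur acc hc])
          (by rw [hgp, gapMap_close cur acc hc])
        simp only [List.isEmpty_nil] at h2
        rw [show PySem.Chars.split₀.go (c :: s) cur acc = PySem.Chars.split₀.go s [] (cur.reverse :: acc) from by
          simp [PySem.Chars.split₀.go, hsp, hc]]
        exact h2
    · rw [show PySem.Chars.split₀.go (c :: s) cur acc = PySem.Chars.split₀.go s (c :: cur) acc from by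
        simp [PySem.Chars.split₀.go, hsp]]
      have hoe : out.isEmpty = (cur.isEmpty && acc.isEmpty) := by
        rw [hout]; exact outMap_empty pad r cur acc hacc
      by_cases hc : cur.isEmpty
      · have hcur : cur = [] := List.isEmpty_iff.mp hc
        subst hcur
        simp only [List.isEmpty_nil]
        by_cases ha : acc.isEmpty
        · have hanil : acc = [] := List.isEmpty_iff.mp ha
          subst hanil
          have hone : out = [] := by
            rw [hout]; simp [outMap, emitW]
          rw [show pass2Step pad r (out, gp, true) c = (out ++ [[c]], gp, false) from by
            simp [pass2Step, hsp, hone]]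
          have h2 := ih [c] [] (out ++ [[c]]) gp (by simp)
            (by rw [hone]; simp [outMap, emitW])
            (by rw [hgp]; simp [gapMap])
          simpa using h2
        · have hanil : acc ≠ [] := fun hh => by rw [hh] at ha; exact ha rfl
          have hone : out.isEmpty = false := by rw [hoe]; simp [ha]
          rw [show pass2Step pad r (out, gp, true) c
              = ((out ++ [pad ++ (if gp < r then [' '] else [])]) ++ [[c]], gp + 1, false) from by
            simp [pass2Step, hsp, hone]]
          have h2 := ih [c] acc ((out ++ [pad ++ (if gp < r then [' '] else [])]) ++ [[c]]) (gp + 1) hacc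
            (by rw [hout, hgp]
                rw [outMap_sep pad r c acc hanil]
                simp [gapMap])
            (by rw [hgp, gapMap_sep c acc hanil])
          simpa using h2
      · have hone : out.isEmpty = false := by rw [hoe]; simp [hc]
        rw [show pass2Step pad r (out, gp, cur.isEmpty) c = (out ++ [[c]], gp, false) from by
          simp [pass2Step, hsp, hc]]
        have h2 := ih (c :: cur) acc (out ++ [[c]]) gp hacc
          (by rw [hout, outMap_extend pad r c cur acc hc])
          (by rw [hgp, gapMap_extend c cur acc hc])
        simpa using h2

theorem flatten_idxEmit (pad : List Char) (r : Int) (ws : List (List Char)) : ∀ (g : Int),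
    (idxEmit pad r g ws).flatten = (Tlist pad ws (r - g)).flatten := by
  induction ws with
  | nil => intro g; simp [idxEmit, Tlist]
  | cons u ws ih =>
    intro g
    simp only [idxEmit, Tlist, List.flatten_cons, List.flatten_append, flatten_emitW]
    rw [ih (g + 1)]
    have hr : r - (g + 1) = r - g - 1 := by ring
    rw [hr]
    by_cases h : g < r
    · rw [if_pos h, if_pos (by omega)]
    · rw [if_neg h, if_neg (by omega)]
      simp

theorem pad_eq (q : Int) :
    (if 0 ≤ q then PySem.List.pyRepeat [' '] (1 + q) else ([' '] : List Char))
      = [' '] ++ PySem.List.pyRepeat [' '] q := by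
  rw [PySem.List.pyRepeat_singleton, PySem.List.pyRepeat_singleton]
  by_cases h : 0 ≤ q
  · rw [if_pos h]
    have : (1 + q).toNat = q.toNat + 1 := by omega
    rw [this, List.replicate_succ]
    rfl
  · rw [if_neg h]
    have : q.toNat = 0 := by omega
    rw [this]
    simp

theorem join_sp_len (w : List Char) (ws : List (List Char)) :
    ((PySem.Chars.join [' '] (w :: ws)).length : Int)
      = ((List.map List.length (w :: ws)).sum : Int) + (ws.length : Int) := by
  rw [join_sp_eq]
  simp
  ring

theorem insere_espacos_main (cad_carateres : String) (larg_coluna : Int) :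
    insere_espacos cad_carateres larg_coluna = insere_espacos_alt cad_carateres larg_coluna := by
  have hns := split₀_no_space cad_carateres.toList
  obtain ⟨b1, h1⟩ := pass1_eq cad_carateres.toList [] [] 0 0 (by simp) (by simp)
  simp only [List.isEmpty_nil] at h1
  rw [show PySem.Chars.split₀.go cad_carateres.toList [] []
      = PySem.Chars.split₀ cad_carateres.toList from rfl] at h1
  simp only [insere_espacos, insere_espacos_alt]
  rw [h1]
  dsimp only
  by_cases h2 : 2 ≤ (PySem.Chars.split₀ cad_carateres.toList).length
  · rw [if_pos h2, if_neg (show ¬ (((PySem.Chars.split₀ cad_carateres.toList).length : Int) < 2) by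
      omega)]
    rcases hW : PySem.Chars.split₀ cad_carateres.toList with _ | ⟨w, ws⟩
    · rw [hW] at h2; simp at h2
    rw [hW] at hns
    -- ===== A side, reduced to the Tlist form =====
    have hbuild : List.foldl (fun acc i => acc ++ [PySem.List.pyGetD (w :: ws) i [], [' ']]) []
        (PySem.List.pyRange 0 (((w :: ws).length : Nat) : Int) 1) = (w :: mix0 ws) ++ [[' ']] := by
      rw [build_eq]; exact build_decomp ws w
    rw [hbuild, PySem.List.pop?_last]
    dsimp only
    have hL0len : ((w :: mix0 ws).length : Nat) = 2 * ws.length + 1 := by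
      simp [mix0_len]
    rw [hL0len, PySem.List.foldl_append_if_eq_filter, List.nil_append]
    have hpos : (PySem.List.pyRange 0 ((2 * ws.length + 1 : Nat) : Int) 1).filter
        (fun i => PySem.Chars.isIn [' '] (PySem.List.pyGetD (w :: mix0 ws) i []))
        = (List.range ws.length).map (fun k => ((2 * k + 1 : Nat) : Int)) := by
      apply filter_odd
      · intro k hk
        rw [PySem.List.pyGetD_natCast, getD_odd ws w k hk]
        decide
      · intro k hk
        rw [PySem.List.pyGetD_natCast, getD_even ws w k]
        rw [List.getD_eq_getElem _ _ (by simpa using Nat.lt_succ_of_le hk)]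
        exact hns _ (List.getElem_mem _)
    rw [hpos]
    simp only [List.length_map, List.length_range]
    have hjoin0 : PySem.Chars.join [] (w :: mix0 ws) = PySem.Chars.join [' '] (w :: ws) := by
      rw [join_nil_eq_flatten, join_sp_eq]
      simp [flatten_mix0]
    rw [hjoin0]
    simp only [List.foldl_map, Int.toNat_natCast, PySem.List.pyGetD_natCast]
    rw [loop1]
    -- ===== B side numbers =====
    have heg : (((w :: ws).length : Nat) : Int) - 1 = ((ws.length : Nat) : Int) := by
      push_cast [List.length_cons]; ring
    have heX : larg_coluna - ((List.map List.length (w :: ws)).sum : Int) - (((ws.length : Nat) : Int))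
        = larg_coluna - (((PySem.Chars.join [' '] (w :: ws)).length : Nat) : Int) := by
      rw [join_sp_len]; ring
    rw [heg, heX]
    -- ===== B side, reduced via pass2 =====
    obtain ⟨g2, b2, h2p⟩ := pass2_eq
      (if 0 ≤ PySem.Int.floordiv
            (larg_coluna - (((PySem.Chars.join [' '] (w :: ws)).length : Nat) : Int))
            ((ws.length : Nat) : Int)
        then PySem.List.pyRepeat [' ']
          (1 + PySem.Int.floordiv
            (larg_coluna - (((PySem.Chars.join [' '] (w :: ws)).length : Nat) : Int))
            ((ws.length : Nat) : Int))
        else [' '])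
      (PySem.Int.mod (larg_coluna - (((PySem.Chars.join [' '] (w :: ws)).length : Nat) : Int))
        ((ws.length : Nat) : Int))
      cad_carateres.toList [] [] [] 0 (by simp) (by simp [outMap, emitW]) (by simp [gapMap])
    simp only [List.isEmpty_nil] at h2p
    rw [show PySem.Chars.split₀.go cad_carateres.toList [] []
        = PySem.Chars.split₀ cad_carateres.toList from rfl] at h2p
    rw [h2p]
    dsimp only
    rw [hW]
    -- ===== both sides to flat character lists =====
    rw [pad_eq]
    by_cases hmod : PySem.Int.mod (larg_coluna - (((PySem.Chars.join [' '] (w :: ws)).length : Nat) : Int)) ((ws.length : Nat) : Int) = 0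
    · rw [if_neg (by simpa using hmod)]
      rw [← Tlist_nonpos ([' '] ++ PySem.List.pyRepeat [' ']
          (PySem.Int.floordiv (larg_coluna - (((PySem.Chars.join [' '] (w :: ws)).length : Nat) : Int)) ((ws.length : Nat) : Int)))
          ws _ (le_of_eq hmod)]
      rw [join_nil_eq_flatten, join_nil_eq_flatten]
      simp only [finMap, List.flatten_cons, List.flatten_append, flatten_emitW]
      rw [flatten_idxEmit]
      rw [sub_zero]
    · rw [if_pos hmod, loop2]
      rw [join_nil_eq_flatten, join_nil_eq_flatten]
      simp only [finMap, List.flatten_cons, List.flatten_append, flatten_emitW]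
      rw [flatten_idxEmit]
      rw [sub_zero]
  · rw [if_neg h2, if_pos (show ((PySem.Chars.split₀ cad_carateres.toList).length : Int) < 2 by
      omega)]
    rw [List.nil_append, padLoop_eq, PySem.List.pyRepeat_singleton]

-- ===== VERDICT (by name: the statement is the Claim_ definition above) =====
theorem insere_espacos_spec : Claim_equal_insere_espacos := by
  intro cad larg _
  unfold Spec_insere_espacos
  exact insere_espacos_main cad larg
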